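-- pv_equiv track=rewrite | github.com/AgboolaTobi/My_Python | Java_in_python/array_snacks.py | alternate_combination
-- ===== SOURCE A (Python) =====
-- def alternate_combination(myArray1, myArray2):
--     merged_array = []
--     min_len = min(len(myArray1), len(myArray2))
--
--     for i in range(min_len):
--         merged_array.append(myArray1[i])
--         merged_array.append(myArray2[i])
--
--     merged_array += myArray1[min_len:] + myArray2[min_len:]
--     return merged_array
-- ===== SOURCE B (Python) =====
-- def alternate_combination(myArray1, myArray2):
--     result = []
--     for i in range(max(len(myArray1), len(myArray2))):
--         if i < len(myArray1):
--             result.append(myArray1[i])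
--         if i < len(myArray2):
--             result.append(myArray2[i])
--     return result
-- ===== Notes on version B (the rewrite author's own statement) =====
-- stated objective: simpler
-- what changed: Single guarded loop over the longer length replaces the min-length interleave loop plus two slice copies and a separate leftover-append step.
import Mathlib
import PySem

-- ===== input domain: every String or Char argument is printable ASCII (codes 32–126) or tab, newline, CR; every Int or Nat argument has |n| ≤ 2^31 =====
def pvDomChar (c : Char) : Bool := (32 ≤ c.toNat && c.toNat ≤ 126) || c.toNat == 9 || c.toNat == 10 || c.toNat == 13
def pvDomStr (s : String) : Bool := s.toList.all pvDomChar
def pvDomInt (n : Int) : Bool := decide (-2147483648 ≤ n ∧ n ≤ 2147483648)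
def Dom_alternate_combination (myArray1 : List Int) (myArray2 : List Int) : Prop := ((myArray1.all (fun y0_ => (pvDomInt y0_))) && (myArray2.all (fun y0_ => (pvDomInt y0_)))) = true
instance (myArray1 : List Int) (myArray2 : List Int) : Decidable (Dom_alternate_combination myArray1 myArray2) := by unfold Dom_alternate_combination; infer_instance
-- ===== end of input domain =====

-- B replaces the min-length interleave loop plus slice-concatenated leftovers by one
-- guarded pass over the longer length (objective: simpler decomposition, same cost).

-- ===== PORT A =====
def alternate_combination (myArray1 : List Int) (myArray2 : List Int) : List Int :=
  let merged_array : List Int := []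
  let min_len : Nat := min myArray1.length myArray2.length
  let merged_array :=
    (PySem.List.pyRange 0 (min_len : Int) 1).foldl
      (fun acc i =>
        (acc ++ [PySem.List.pyGetD myArray1 i 0]) ++ [PySem.List.pyGetD myArray2 i 0])
      merged_array
  merged_array ++
    (PySem.List.slice myArray1 (some (min_len : Int)) none ++
     PySem.List.slice myArray2 (some (min_len : Int)) none)

-- ===== PORT B =====
def alternate_combination_alt (myArray1 : List Int) (myArray2 : List Int) : List Int :=
  (PySem.List.pyRange 0 (max myArray1.length myArray2.length : Int) 1).foldl
    (fun acc i =>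
      let acc := if i < (myArray1.length : Int) then acc ++ [PySem.List.pyGetD myArray1 i 0] else acc
      if i < (myArray2.length : Int) then acc ++ [PySem.List.pyGetD myArray2 i 0] else acc)
    []

-- ===== PRECONDITION & SPEC =====
def Spec_alternate_combination (myArray1 : List Int) (myArray2 : List Int) (out : List Int) : Prop := out = alternate_combination_alt myArray1 myArray2
instance (myArray1 : List Int) (myArray2 : List Int) (out : List Int) : Decidable (Spec_alternate_combination myArray1 myArray2 out) := by unfold Spec_alternate_combination; infer_instance

-- ===== CLAIM (what is proved, stated in full; the proofs are below) =====
def Claim_equal_alternate_combination : Prop := ∀ (myArray1 : List Int) (myArray2 : List Int), Dom_alternate_combination myArray1 myArray2 → Spec_alternate_combination myArray1 myArray2 (alternate_combination myArray1 myArray2)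

-- ===== LEMMAS AND PROOFS =====

/-- canonical interleaving, the common value of both programs -/
def ilv : List Int → List Int → List Int
  | [], ys => ys
  | x :: xs, [] => x :: xs
  | x :: xs, y :: ys => x :: y :: ilv xs ys

theorem A_flatMap (a1 a2 : List Int) :
    alternate_combination a1 a2 =
      (List.range (min a1.length a2.length)).flatMap
          (fun k => [a1.getD k 0, a2.getD k 0]) ++
        (a1.drop (min a1.length a2.length) ++ a2.drop (min a1.length a2.length)) := by
  unfold alternate_combination
  dsimp only
  rw [PySem.List.pyRange_one, PySem.List.slice_from_natCast, PySem.List.slice_from_natCast]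
  simp [PySem.List.foldl_append_eq_flatMap
    (g := fun (i : Int) => [PySem.List.pyGetD a1 i 0, PySem.List.pyGetD a2 i 0])]
  rw [show (min (a1.length : Int) (a2.length : Int)).toNat = min a1.length a2.length from by omega]
  simp [List.flatMap_map, PySem.List.pyGetD_natCast]

theorem B_flatMap (a1 a2 : List Int) :
    alternate_combination_alt a1 a2 =
      (List.range (max a1.length a2.length)).flatMap
        (fun k => (if k < a1.length then [a1.getD k 0] else []) ++
                  (if k < a2.length then [a2.getD k 0] else [])) := by
  unfold alternate_combination_alt
  rw [PySem.List.pyRange_one]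
  rw [List.foldl_map]
  have hn : ((max (a1.length : Int) (a2.length : Int)) - 0).toNat = max a1.length a2.length := by
    omega
  rw [hn]
  have h : (fun (x : List Int) (y : Nat) =>
        let acc := if ((0 : Int) + y) < (a1.length : Int) then x ++ [PySem.List.pyGetD a1 ((0 : Int) + y) 0] else x;
        if ((0 : Int) + y) < (a2.length : Int) then acc ++ [PySem.List.pyGetD a2 ((0 : Int) + y) 0] else acc)
      = fun (x : List Int) (y : Nat) =>
        x ++ ((if y < a1.length then [a1.getD y 0] else []) ++
              (if y < a2.length then [a2.getD y 0] else [])) := by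
    funext x y
    simp only [zero_add, Nat.cast_lt, PySem.List.pyGetD_natCast]
    split_ifs <;> simp
  rw [h, PySem.List.foldl_append_eq_flatMap]
  simp

theorem side (zs : List Int) :
    (List.range zs.length).flatMap
        (fun k => if k < zs.length then [zs.getD k 0] else []) = zs := by
  induction zs with
  | nil => simp
  | cons z zs ih =>
    rw [List.length_cons, List.range_succ_eq_map]
    simpa [List.flatMap_map] using ih

theorem A_eq_ilv (a1 : List Int) : ∀ a2 : List Int,
    alternate_combination a1 a2 = ilv a1 a2 := by
  induction a1 with
  | nil => intro a2; rw [A_flatMap]; simp [ilv]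
  | cons x xs ih =>
    intro a2
    cases a2 with
    | nil => rw [A_flatMap]; simp [ilv]
    | cons y ys =>
      rw [A_flatMap]
      have := (A_flatMap xs ys).symm.trans (ih ys)
      rw [ilv]
      rw [show min (x :: xs).length (y :: ys).length = min xs.length ys.length + 1 by
        simp [Nat.succ_min_succ]]
      rw [List.range_succ_eq_map]
      simpa [List.flatMap_map] using this

theorem B_eq_ilv (a1 : List Int) : ∀ a2 : List Int,
    alternate_combination_alt a1 a2 = ilv a1 a2 := by
  induction a1 with
  | nil =>
    intro a2
    rw [B_flatMap]
    have := side a2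
    cases a2 with
    | nil => simp [ilv]
    | cons y ys => simpa [ilv] using this
  | cons x xs ih =>
    intro a2
    cases a2 with
    | nil =>
      rw [B_flatMap]
      have := side (x :: xs)
      simpa [ilv] using this
    | cons y ys =>
      rw [B_flatMap]
      have := (B_flatMap xs ys).symm.trans (ih ys)
      rw [ilv]
      rw [show max (x :: xs).length (y :: ys).length = max xs.length ys.length + 1 by
        simp [Nat.succ_max_succ]]
      rw [List.range_succ_eq_map]
      simpa [List.flatMap_map, Nat.succ_lt_succ_iff] using this

-- ===== VERDICT (by name: the statement is the Claim_ definition above) =====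
theorem alternate_combination_spec : Claim_equal_alternate_combination := by
  intro a1 a2 _
  unfold Spec_alternate_combination
  rw [A_eq_ilv, B_eq_ilv]
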